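-- pv_equiv track=rewrite | github.com/nanduapana/Financial-AI | flask_project/app.py | count_sentiment
-- ===== SOURCE A (Python) =====
-- def count_sentiment(stock_data):
--     # Initialize counters
--     total_sentiments = 0
--     positive_sentiments = 0
--     negative_sentiments = 0
--
--     # Loop through the articles
--     for article in stock_data:
--         sentiment = article['Sentiment']
--         total_sentiments += 1  # Increment total sentiment count
--         if sentiment == 'POSITIVE':
--             positive_sentiments += 1
--         elif sentiment == 'NEGATIVE':
--             negative_sentiments += 1
--
--     return total_sentiments,positive_sentiments,negative_sentiments
-- ===== SOURCE B (Python) =====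
-- def count_sentiment(stock_data):
--     # Staged passes: first extract all sentiment labels, then count with list.count.
--     labels = [article['Sentiment'] for article in stock_data]
--     return len(labels), labels.count('POSITIVE'), labels.count('NEGATIVE')
-- ===== Notes on version B (the rewrite author's own statement) =====
-- stated objective: idiomatic
-- what changed: B drops A's single pass with three running counters and instead extracts the label list once and derives the three results by staged library passes (len and two list.count calls); no if/elif control flow or accumulator state remains.
import Mathlib
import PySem

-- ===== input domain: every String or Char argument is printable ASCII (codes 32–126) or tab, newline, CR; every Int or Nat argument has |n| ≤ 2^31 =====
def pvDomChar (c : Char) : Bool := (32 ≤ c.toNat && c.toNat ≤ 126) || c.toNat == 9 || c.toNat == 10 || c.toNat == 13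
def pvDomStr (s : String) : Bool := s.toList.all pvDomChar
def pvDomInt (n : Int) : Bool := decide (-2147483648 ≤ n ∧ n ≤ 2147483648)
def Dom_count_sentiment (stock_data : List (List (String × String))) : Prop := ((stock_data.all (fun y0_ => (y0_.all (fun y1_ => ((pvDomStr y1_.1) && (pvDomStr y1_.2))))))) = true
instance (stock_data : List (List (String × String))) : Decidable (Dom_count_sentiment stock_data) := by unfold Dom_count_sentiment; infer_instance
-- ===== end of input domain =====

-- B replaces A's single pass with three running counters by staged passes: extract the label list, then len + two list.count calls; same O(n).
-- ===== PORT A =====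
def count_sentiment (stock_data : List (List (String × String))) : Int × Int × Int :=
  stock_data.foldl
    (fun acc article =>
      -- article['Sentiment']: exact under Pre_ (the key is present; getD's default is never used)
      let sentiment := (PySem.Dict.ofList article).getD "Sentiment" ""
      if sentiment == "POSITIVE" then (acc.1 + 1, acc.2.1 + 1, acc.2.2)
      else if sentiment == "NEGATIVE" then (acc.1 + 1, acc.2.1, acc.2.2 + 1)
      else (acc.1 + 1, acc.2.1, acc.2.2))
    (0, 0, 0)

-- ===== PORT B =====
def count_sentiment_alt (stock_data : List (List (String × String))) : Int × Int × Int :=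
  -- article['Sentiment']: exact under Pre_ (the key is present; getD's default is never used)
  let labels := stock_data.map (fun article => (PySem.Dict.ofList article).getD "Sentiment" "")
  ((labels.length : Int),
   (PySem.List.count labels "POSITIVE" : Int),
   (PySem.List.count labels "NEGATIVE" : Int))

-- ===== PRECONDITION & SPEC =====
-- Pre_ excludes articles lacking a 'Sentiment' key, on which the Python A raises KeyError.
def Pre_count_sentiment (stock_data : List (List (String × String))) : Prop :=
  ∀ article ∈ stock_data, "Sentiment" ∈ article.map Prod.fst
instance (stock_data : List (List (String × String))) : Decidable (Pre_count_sentiment stock_data) := by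
  unfold Pre_count_sentiment; infer_instance
def pvWitness_count_sentiment : (List (List (String × String))) :=
  [[("Sentiment", "POSITIVE")], [("Sentiment", "ok")]]

def Spec_count_sentiment (stock_data : List (List (String × String))) (out : Int × Int × Int) : Prop := out = count_sentiment_alt stock_data
instance (stock_data : List (List (String × String))) (out : Int × Int × Int) : Decidable (Spec_count_sentiment stock_data out) := by unfold Spec_count_sentiment; infer_instance

-- ===== CLAIM (what is proved, stated in full; the proofs are below) =====
def Claim_equal_count_sentiment : Prop := ∀ (stock_data : List (List (String × String))), Dom_count_sentiment stock_data → Pre_count_sentiment stock_data → Spec_count_sentiment stock_data (count_sentiment stock_data)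

-- ===== LEMMAS AND PROOFS =====

-- A's loop over the label list computes (length, count POSITIVE, count NEGATIVE)
theorem pvA_loop (l : List String) (t p n : Int) :
    l.foldl
      (fun (acc : Int × Int × Int) s =>
        if s == "POSITIVE" then (acc.1 + 1, acc.2.1 + 1, acc.2.2)
        else if s == "NEGATIVE" then (acc.1 + 1, acc.2.1, acc.2.2 + 1)
        else (acc.1 + 1, acc.2.1, acc.2.2)) (t, p, n)
    = (t + l.length, p + l.count "POSITIVE", n + l.count "NEGATIVE") := by
  induction l generalizing t p n with
  | nil => simp
  | cons x xs ih =>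
    simp only [List.foldl_cons, List.count_cons]
    by_cases hp : x = "POSITIVE"
    · subst hp
      rw [if_pos (by simp)]
      rw [ih]
      simp
      omega
    · by_cases hn : x = "NEGATIVE"
      · subst hn
        rw [if_neg (by simp), if_pos (by simp)]
        rw [ih]
        simp
        omega
      · rw [if_neg (by simp [hp]), if_neg (by simp [hn])]
        rw [ih]
        simp [hp, hn]
        omega

-- ===== VERDICT (by name: the statement is the Claim_ definition above) =====
theorem count_sentiment_spec : Claim_equal_count_sentiment := by
  intro sd _ _
  unfold Spec_count_sentiment count_sentiment count_sentiment_alt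
  have := pvA_loop (sd.map (fun article => (PySem.Dict.ofList article).getD "Sentiment" "")) 0 0 0
  rw [List.foldl_map] at this
  simpa [PySem.List.count_eq] using this
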